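-- pv_equiv track=rewrite | github.com/sungyeon-0975/algo_study | 210826/신규아이디추천_yoon.py | solution
-- ===== SOURCE A (Python) =====
-- def solution(new_id):
--     answer = ''
--     special = ['-', '_', '.']
--
--     for char in new_id:
--         idx = new_id.index(char)
--         # 1. 대문자를 소문자로 치환
--         if char.isupper():
--             answer += char.lower()
--         # 2. 문자제거
--         elif not char.islower() and not char.isdigit() and char not in special:
--             pass
--         # 3. 마침표 중복 제거
--         elif answer and char == '.' and answer[-1] == '.':
--             pass
--         else:
--             answer += char
--
--     # 3. 처음이나 끝 마침표 제거
--     answer = answer.strip('.')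
--
--     # 5. 빈 문자열 처리
--     if not answer:
--         answer = 'a'
--
--     # 6. 16자 이상
--     if len(answer) >= 16:
--         answer = answer[:15]
--
--     # 3. 처음이나 끝 마침표 제거
--     answer = answer.strip('.')
--
--     # 7. 2자 이하
--     while answer and len(answer) < 3:
--         answer += answer[-1]
--
--     return answer
-- ===== SOURCE B (Python) =====
-- def solution(new_id):
--     # multi-pass pipeline instead of A's single fused character loop
--     s = ''.join(c for c in new_id.lower() if c.islower() or c.isdigit() or c in '-_.')
--     s = s[:1] + ''.join(c for p, c in zip(s, s[1:]) if not (p == c == '.'))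
--     s = s.strip('.') or 'a'
--     s = s[:15].strip('.')
--     return (s + s[-1:] * 2)[:3] if len(s) < 3 else s
-- ===== Notes on version B (the rewrite author's own statement) =====
-- stated objective: faster
-- what changed: A's single fused character loop (stateful accumulator deciding lowercase/delete/dot-dedup per char, plus a dead quadratic new_id.index call per char and a padding while-loop) is replaced by a multi-pass linear pipeline: lowercase+filter comprehension, dot-run collapse by zipping the string with itself shifted by one, strip, unconditional [:15] truncation, and closed-form padding (s + s[-1:]*2)[:3].
import Mathlib
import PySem

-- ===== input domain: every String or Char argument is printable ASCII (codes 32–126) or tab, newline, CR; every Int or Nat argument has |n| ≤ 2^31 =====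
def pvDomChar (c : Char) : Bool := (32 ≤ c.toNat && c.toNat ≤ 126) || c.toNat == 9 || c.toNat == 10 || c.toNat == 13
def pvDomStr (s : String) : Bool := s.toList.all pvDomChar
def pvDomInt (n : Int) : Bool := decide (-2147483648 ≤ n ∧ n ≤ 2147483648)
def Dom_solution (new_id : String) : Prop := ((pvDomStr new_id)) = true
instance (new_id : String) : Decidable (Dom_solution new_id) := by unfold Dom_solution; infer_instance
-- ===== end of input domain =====

-- B replaces A's single fused stateful character loop by a multi-pass pipeline
-- (lowercase+filter, collapse dots by zipping with the previous character,
-- strip, closed-form truncate and pad), dropping A's dead per-char new_id.index scan; objective: faster.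

-- ===== PORT A =====
def pvSpecial : List Char := ['-', '_', '.']

-- one iteration of A's `for char in new_id` loop (acc = answer)
def pvAStep (new_id : List Char) (acc : List Char) (c : Char) : List Char :=
  let _idx := PySem.Chars.find new_id [c]   -- `idx = new_id.index(char)`: computed, never used (char occurs in new_id, so no ValueError)
  if PySem.Chars.isupper c then acc ++ [PySem.Chars.lowerChar c]
  else if !PySem.Chars.islower c && !PySem.Chars.isdigit c && !(pvSpecial.contains c) then acc
  else if (PySem.List.pyGet? acc (-1) == some '.') && (c == '.') then acc   -- `answer and char == '.' and answer[-1] == '.'`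
  else acc ++ [c]

-- `while answer and len(answer) < 3: answer += answer[-1]`
def pvPad (cs : List Char) : List Char :=
  if h : cs ≠ [] ∧ cs.length < 3 then pvPad (cs ++ [cs.getLast h.1]) else cs
termination_by 3 - cs.length
decreasing_by simp; omega

def solution (new_id : String) : String :=
  let cs := new_id.toList
  let answer := cs.foldl (pvAStep cs) []
  let answer := PySem.Chars.stripChars answer ['.']       -- answer.strip('.')
  let answer := if answer = [] then ['a'] else answer
  let answer := if 16 ≤ answer.length then PySem.Chars.slice answer none (some 15) else answer
  let answer := PySem.Chars.stripChars answer ['.']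
  String.ofList (pvPad answer)

-- ===== PORT B =====
def solution_alt (new_id : String) : String :=
  let s0 := (PySem.Str.lower new_id).toList.filter
      (fun c => PySem.Chars.islower c || PySem.Chars.isdigit c || pvSpecial.contains c)  -- `c in '-_.'` (single char: membership)
  let s1 := s0.take 1 ++ ((s0.zip (s0.drop 1)).filter (fun pc => !(pc.1 == '.' && pc.2 == '.'))).map Prod.snd
  let s2 := PySem.Chars.stripChars s1 ['.']
  let s3 := if s2 = [] then ['a'] else s2                  -- `or 'a'`
  let s4 := PySem.Chars.stripChars (s3.take 15) ['.']      -- s[:15].strip('.')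
  if s4.length < 3 then
    String.ofList ((s4 ++ (PySem.List.slice s4 (some (-1)) none ++ PySem.List.slice s4 (some (-1)) none)).take 3)  -- `(s + s[-1:]*2)[:3]`
  else String.ofList s4

-- ===== PRECONDITION & SPEC =====
def Spec_solution (new_id : String) (out : String) : Prop := out = solution_alt new_id
instance (new_id : String) (out : String) : Decidable (Spec_solution new_id out) := by unfold Spec_solution; infer_instance

-- ===== CLAIM (what is proved, stated in full; the proofs are below) =====
def Claim_equal_solution : Prop := ∀ (new_id : String), Dom_solution new_id → Spec_solution new_id (solution new_id)

-- ===== LEMMAS AND PROOFS =====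

-- the filter predicate both pipelines share
def pvAllowed (c : Char) : Bool := PySem.Chars.islower c || PySem.Chars.isdigit c || pvSpecial.contains c
-- A's loop body on an already-lowercased allowed character (dot-dedup append)
def pvH (acc : List Char) (c : Char) : List Char :=
  if (PySem.List.pyGet? acc (-1) == some '.') && (c == '.') then acc else acc ++ [c]
-- A's loop body on an already-lowercased character
def pvG (acc : List Char) (c : Char) : List Char := if pvAllowed c then pvH acc c else acc
-- collapsing runs of dots, recursively (p = previous character kept)
def pvCollapseAfter (p : Char) : List Char → List Char
  | [] => []
  | c :: t => if p == '.' && c == '.' then pvCollapseAfter c t else c :: pvCollapseAfter c t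
def pvCollapse : List Char → List Char
  | [] => []
  | c :: t => c :: pvCollapseAfter c t

theorem pv_upper (c : Char) (h : PySem.Chars.isupper c = true) :
    PySem.Chars.islower (PySem.Chars.lowerChar c) = true ∧ PySem.Chars.lowerChar c ≠ '.' := by
  simp only [PySem.Chars.isupper, Bool.and_eq_true, decide_eq_true_eq, Char.le_def,
    UInt32.le_iff_toNat_le] at h
  have hb : 65 ≤ c.toNat ∧ c.toNat ≤ 90 := h
  have hval : (c.toNat + 32).isValidChar := by left; omega
  have htn : (Char.ofNat (c.toNat + 32)).toNat = c.toNat + 32 := by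
    rw [Char.toNat_ofNat, if_pos hval]
  have hup : PySem.Chars.isupper c = true := by
    simp [PySem.Chars.isupper, Char.le_def, UInt32.le_iff_toNat_le]; omega
  constructor
  · simp only [PySem.Chars.lowerChar, PySem.Chars.islower, hup, if_pos, Bool.and_eq_true,
      decide_eq_true_eq, Char.le_def, UInt32.le_iff_toNat_le]
    change 97 ≤ (Char.ofNat (c.toNat + 32)).toNat ∧ (Char.ofNat (c.toNat + 32)).toNat ≤ 122
    omega
  · simp only [PySem.Chars.lowerChar, hup, if_pos]
    intro he
    have h2 : (Char.ofNat (c.toNat + 32)).toNat = ('.' : Char).toNat := by rw [he]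
    rw [htn] at h2
    have h3 : c.toNat + 32 = 46 := h2
    omega

theorem pv_lower_of_not_upper (c : Char) (h : PySem.Chars.isupper c = false) :
    PySem.Chars.lowerChar c = c := by
  simp [PySem.Chars.lowerChar, h]

-- step fusion: one A-iteration is pvG on the lowercased character
theorem pv_step (nid acc : List Char) (c : Char) :
    pvAStep nid acc c = pvG acc (PySem.Chars.lowerChar c) := by
  by_cases hu : PySem.Chars.isupper c = true
  · obtain ⟨hl, hd⟩ := pv_upper c hu
    unfold pvAStep pvG pvH pvAllowed
    simp [hu, hl, hd]
  · have hu' : PySem.Chars.isupper c = false := by simpa using hu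
    rw [pv_lower_of_not_upper c hu']
    unfold pvAStep pvG pvH pvAllowed
    simp only [hu', Bool.false_eq_true, if_false]
    by_cases ha : (PySem.Chars.islower c || PySem.Chars.isdigit c || pvSpecial.contains c) = true
    · have h2 : (!PySem.Chars.islower c && !PySem.Chars.isdigit c && !pvSpecial.contains c) = false := by
        simp only [Bool.or_eq_true] at ha
        rcases ha with (h | h) | h <;> simp [h]
        intro _ _; simpa using h
      simp only [ha, if_true, h2, Bool.false_eq_true, if_false]
    · have ha' : (PySem.Chars.islower c || PySem.Chars.isdigit c || pvSpecial.contains c) = false := by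
        simpa using ha
      have h2 : (!PySem.Chars.islower c && !PySem.Chars.isdigit c && !pvSpecial.contains c) = true := by
        simp only [Bool.or_eq_false_iff] at ha'
        simp only [ha'.1.1, ha'.1.2, Bool.not_false, Bool.and_self, Bool.true_and]
        simpa using ha'.2
      simp only [ha', h2, if_true, Bool.false_eq_true, if_false]

theorem pv_fold_map (nid : List Char) (cs : List Char) (acc : List Char) :
    cs.foldl (pvAStep nid) acc = (cs.map PySem.Chars.lowerChar).foldl pvG acc := by
  induction cs generalizing acc with
  | nil => rfl
  | cons c t ih => simp only [List.foldl_cons, List.map_cons, pv_step, ih]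

theorem pv_fold_filter (ds : List Char) (acc : List Char) :
    ds.foldl pvG acc = (ds.filter pvAllowed).foldl pvH acc := by
  induction ds generalizing acc with
  | nil => rfl
  | cons d t ih =>
    by_cases hd : pvAllowed d = true
    · simp [List.foldl_cons, hd, pvG, ih]
    · have hd' : pvAllowed d = false := by simpa using hd
      simp [List.foldl_cons, hd', pvG, ih]

theorem pv_last (acc : List Char) (c : Char) :
    PySem.List.pyGet? (acc ++ [c]) (-1) = some c := by
  simp [PySem.List.pyGet?, PySem.List.pyIdx?]

theorem pv_fold_collapse_aux (es : List Char) (acc : List Char) (c : Char) :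
    es.foldl pvH (acc ++ [c]) = acc ++ c :: pvCollapseAfter c es := by
  induction es generalizing acc c with
  | nil => simp [pvCollapseAfter]
  | cons e t ih =>
    simp only [List.foldl_cons]
    by_cases hce : (c == '.' && e == '.') = true
    · have hc : c = '.' := by simp at hce; exact hce.1
      have he : e = '.' := by simp at hce; exact hce.2
      have h0 : pvH (acc ++ [c]) e = acc ++ [c] := by
        simp [pvH, hc, he]
      rw [h0, ih, pvCollapseAfter]
      simp [hc, he]
    · have h0 : pvH (acc ++ [c]) e = (acc ++ [c]) ++ [e] := by
        simp only [pvH, pv_last]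
        simp only [Bool.and_eq_true, beq_iff_eq] at hce ⊢
        rw [if_neg]
        intro ⟨h1, h2⟩
        exact hce ⟨by simpa using h1, h2⟩
      rw [h0, ih (acc ++ [c]) e, pvCollapseAfter]
      have hne : (c == '.' && e == '.') = false := by simpa using hce
      simp [hne]

theorem pv_fold_collapse (es : List Char) : es.foldl pvH [] = pvCollapse es := by
  cases es with
  | nil => rfl
  | cons e t =>
    have h0 : pvH [] e = [] ++ [e] := by simp [pvH, PySem.List.pyGet?, PySem.List.pyIdx?]
    simp only [List.foldl_cons, h0]
    rw [pv_fold_collapse_aux t [] e]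
    rfl

theorem pv_zip_aux (t : List Char) (p : Char) :
    ((((p :: t).zip t).filter (fun pc => !(pc.1 == '.' && pc.2 == '.'))).map Prod.snd)
      = pvCollapseAfter p t := by
  induction t generalizing p with
  | nil => rfl
  | cons c t' ih =>
    simp only [List.zip_cons_cons, List.filter_cons]
    by_cases h : (p == '.' && c == '.') = true
    · simp only [h, Bool.not_true, pvCollapseAfter, if_pos]
      simpa using ih c
    · have h' : (p == '.' && c == '.') = false := by simpa using h
      rw [h']
      simp only [Bool.not_false, if_true, List.map_cons, pvCollapseAfter, h',
        Bool.false_eq_true, if_false]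
      exact congrArg (c :: ·) (ih c)

theorem pv_zip (s : List Char) :
    s.take 1 ++ ((s.zip (s.drop 1)).filter (fun pc => !(pc.1 == '.' && pc.2 == '.'))).map Prod.snd
      = pvCollapse s := by
  cases s with
  | nil => rfl
  | cons a t =>
    simp only [List.take_succ_cons, List.take_zero, List.drop_succ_cons, List.drop_zero,
      pvCollapse]
    rw [pv_zip_aux t a]
    simp

-- A's conditional truncation equals B's unconditional take 15
theorem pv_trunc (s : List Char) :
    (if 16 ≤ s.length then PySem.Chars.slice s none (some 15) else s) = s.take 15 := by
  by_cases h : 16 ≤ s.length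
  · rw [if_pos h]
    simp only [PySem.Chars.slice_eq_listSlice]
    rw [PySem.List.slice_to s (by norm_num : (0:Int) ≤ 15)]
    rfl
  · rw [if_neg h]
    exact (List.take_of_length_le (by omega)).symm

theorem pv_slice_last_one (a : Char) : PySem.List.slice [a] (some (-1)) none = [a] := by
  simp [PySem.List.slice, PySem.List.clampIdx]

theorem pv_slice_last_two (a b : Char) : PySem.List.slice [a, b] (some (-1)) none = [b] := by
  simp [PySem.List.slice, PySem.List.clampIdx]

-- A's padding while-loop equals B's closed form
theorem pv_pad (s : List Char) :
    pvPad s = if s.length < 3 then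
        (s ++ (PySem.List.slice s (some (-1)) none ++ PySem.List.slice s (some (-1)) none)).take 3
      else s := by
  match s with
  | [] => rw [pvPad]; simp [PySem.List.slice]
  | [a] =>
    rw [pvPad, dif_pos (by simp)]
    simp only [List.getLast, List.cons_append, List.nil_append]
    rw [pvPad, dif_pos (by simp)]
    simp only [List.getLast, List.cons_append, List.nil_append]
    rw [pvPad, dif_neg (by simp)]
    rw [pv_slice_last_one]
    simp
  | [a, b] =>
    rw [pvPad]
    rw [dif_pos (by simp)]
    simp only [List.getLast, List.cons_append, List.nil_append]
    rw [pvPad, dif_neg (by simp)]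
    rw [pv_slice_last_two]
    simp
  | a :: b :: c :: t =>
    rw [pvPad, dif_neg (by simp), if_neg (by simp)]

-- ===== VERDICT (by name: the statement is the Claim_ definition above) =====
theorem solution_spec : Claim_equal_solution := by
  intro new_id _
  unfold Spec_solution solution solution_alt
  simp only []
  have hlower : (PySem.Str.lower new_id).toList = new_id.toList.map PySem.Chars.lowerChar := by
    simp [PySem.Str.lower, PySem.Chars.lower]
  rw [hlower]
  have hpred : (fun c => PySem.Chars.islower c || PySem.Chars.isdigit c || pvSpecial.contains c)
      = pvAllowed := rfl
  rw [hpred]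
  set s0 := (new_id.toList.map PySem.Chars.lowerChar).filter pvAllowed with hs0
  have hloop : new_id.toList.foldl (pvAStep new_id.toList) [] = pvCollapse s0 := by
    rw [pv_fold_map, pv_fold_filter, pv_fold_collapse]
  rw [hloop, pv_zip s0]
  set s2 := PySem.Chars.stripChars (pvCollapse s0) ['.'] with hs2
  set s3 := if s2 = [] then ['a'] else s2 with hs3
  rw [pv_trunc s3]
  set s4 := PySem.Chars.stripChars (s3.take 15) ['.'] with hs4
  rw [pv_pad s4]
  split <;> rfl
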